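-- pv_equiv track=rewrite | github.com/KarolBorecki/api-load-tool | distributed_tool/client.py | create_scopes
-- ===== SOURCE A (Python) =====
-- def create_scopes(number_of_requests: int, number_of_tasks: int) -> list[tuple[int, int]]:
--     res_table = []
--
--     base_requests_per_task = number_of_requests // number_of_tasks
--     remaining_requests = number_of_requests % number_of_tasks
--
--     start_index = 0
--     for i in range(number_of_tasks):
--         requests_for_this_task = base_requests_per_task + (1 if i < remaining_requests else 0)
--         end_index = start_index + requests_for_this_task
--         res_table.append((start_index, end_index))
--         start_index = end_index
--
--     return res_table
-- ===== SOURCE B (Python) =====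
-- def create_scopes(number_of_requests: int, number_of_tasks: int) -> list[tuple[int, int]]:
--     base = number_of_requests // number_of_tasks
--     rem = number_of_requests % number_of_tasks
--     return [(i * base + min(i, rem), (i + 1) * base + min(i + 1, rem))
--             for i in range(number_of_tasks)]
-- ===== Notes on version B (the rewrite author's own statement) =====
-- stated objective: simpler
-- what changed: Each scope's boundaries are computed in closed form from its index (i*base + min(i, rem)) in a single comprehension, instead of threading a running start_index through the loop.
import Mathlib
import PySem

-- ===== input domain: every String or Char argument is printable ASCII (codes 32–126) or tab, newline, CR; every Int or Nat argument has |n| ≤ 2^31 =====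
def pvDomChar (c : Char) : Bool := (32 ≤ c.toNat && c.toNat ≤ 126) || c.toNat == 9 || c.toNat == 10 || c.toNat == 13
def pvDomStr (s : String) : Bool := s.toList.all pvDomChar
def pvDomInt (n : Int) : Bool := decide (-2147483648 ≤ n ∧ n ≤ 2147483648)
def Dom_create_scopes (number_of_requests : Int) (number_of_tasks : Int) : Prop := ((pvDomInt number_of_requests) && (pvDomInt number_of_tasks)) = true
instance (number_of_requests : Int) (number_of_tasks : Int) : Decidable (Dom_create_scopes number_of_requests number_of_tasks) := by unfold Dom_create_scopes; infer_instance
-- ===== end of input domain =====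

-- B computes each scope's boundaries in closed form from its index instead of threading a
-- running start_index through the loop (objective: simpler).

-- ===== PORT A =====
def create_scopes (number_of_requests : Int) (number_of_tasks : Int) : List (Int × Int) :=
  let base_requests_per_task := PySem.Int.floordiv number_of_requests number_of_tasks
  let remaining_requests := PySem.Int.mod number_of_requests number_of_tasks
  ((PySem.List.pyRange 0 number_of_tasks 1).foldl
    (fun (st : List (Int × Int) × Int) i =>
      let requests_for_this_task := base_requests_per_task + (if i < remaining_requests then 1 else 0)
      let end_index := st.2 + requests_for_this_task
      (st.1 ++ [(st.2, end_index)], end_index))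
    ([], 0)).1

-- ===== PORT B =====
def create_scopes_alt (number_of_requests : Int) (number_of_tasks : Int) : List (Int × Int) :=
  let base := PySem.Int.floordiv number_of_requests number_of_tasks
  let rem := PySem.Int.mod number_of_requests number_of_tasks
  (PySem.List.pyRange 0 number_of_tasks 1).map
    (fun i => (i * base + min i rem, (i + 1) * base + min (i + 1) rem))

-- ===== PRECONDITION & SPEC =====
-- Pre_ excludes number_of_tasks = 0, where A raises ZeroDivisionError.
def Pre_create_scopes (number_of_requests : Int) (number_of_tasks : Int) : Prop :=
  number_of_tasks ≠ 0
instance (number_of_requests : Int) (number_of_tasks : Int) : Decidable (Pre_create_scopes number_of_requests number_of_tasks) := by unfold Pre_create_scopes; infer_instance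

def pvWitness_create_scopes : Int × Int := (10, 3)

def Spec_create_scopes (number_of_requests : Int) (number_of_tasks : Int) (out : List (Int × Int)) : Prop := out = create_scopes_alt number_of_requests number_of_tasks
instance (number_of_requests : Int) (number_of_tasks : Int) (out : List (Int × Int)) : Decidable (Spec_create_scopes number_of_requests number_of_tasks out) := by unfold Spec_create_scopes; infer_instance

-- ===== CLAIM (what is proved, stated in full; the proofs are below) =====
def Claim_equal_create_scopes : Prop := ∀ (number_of_requests : Int) (number_of_tasks : Int), Dom_create_scopes number_of_requests number_of_tasks → Pre_create_scopes number_of_requests number_of_tasks → Spec_create_scopes number_of_requests number_of_tasks (create_scopes number_of_requests number_of_tasks)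

-- ===== LEMMAS AND PROOFS =====

-- Loop invariant: folding over range(m) produces the closed-form list and the running
-- start index m*base + min m rem.
theorem create_scopes_loop (base rem : Int) (hrem : 0 ≤ rem) : ∀ (m : Nat),
    ((PySem.List.pyRange 0 (m : Int) 1).foldl
      (fun (st : List (Int × Int) × Int) i =>
        let req := base + (if i < rem then 1 else 0)
        let e := st.2 + req
        (st.1 ++ [(st.2, e)], e))
      ([], 0))
    = ((PySem.List.pyRange 0 (m : Int) 1).map
        (fun i => (i * base + min i rem, (i + 1) * base + min (i + 1) rem)),
       (m : Int) * base + min (m : Int) rem) := by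
  intro m
  induction m with
  | zero => simp [PySem.List.pyRange_one_eq_nil]; omega
  | succ k ih =>
    have h0 : (0 : Int) ≤ (k : Int) := by positivity
    have hsplit : PySem.List.pyRange 0 ((k : Int) + 1) 1
        = PySem.List.pyRange 0 (k : Int) 1 ++ [(k : Int)] :=
      PySem.List.pyRange_one_succ_right h0
    have hs : (k : Int) * base + min (k : Int) rem + (base + (if (k : Int) < rem then 1 else 0))
        = ((k : Int) + 1) * base + min ((k : Int) + 1) rem := by
      have hb : ((k : Int) + 1) * base = (k : Int) * base + base := by ring
      rw [hb]
      generalize (k : Int) * base = K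
      split_ifs <;> omega
    push_cast
    rw [hsplit, List.foldl_append, List.map_append, ih]
    simp only [List.foldl_cons, List.foldl_nil, List.map_cons, List.map_nil]
    rw [hs]

theorem create_scopes_spec : Claim_equal_create_scopes := by
  intro n t _ ht
  unfold Spec_create_scopes create_scopes create_scopes_alt
  by_cases htp : 0 < t
  · have hcast : ((t.toNat : Nat) : Int) = t := by omega
    have hrem : 0 ≤ PySem.Int.mod n t := PySem.Int.mod_nonneg (a := n) htp
    have h := create_scopes_loop (PySem.Int.floordiv n t) (PySem.Int.mod n t) hrem t.toNat
    rw [hcast] at h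
    exact congrArg Prod.fst h
  · rw [PySem.List.pyRange_one_eq_nil (by omega)]
    simp
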